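-- pv_equiv track=rewrite | github.com/0x32767/Python-British-Informatics-Olympiad-Solutions | 2014/question1.py | solution
-- ===== SOURCE A (Python) =====
-- def generate_lucky_numbers():
--     # 10,004 is the first lucky number over 10k
--     nums = list(range(1, 10_004, 2))
--     last_lucky = 3
--
--     for _ in range(168):
--         for i in reversed(range(last_lucky-1, len(nums), last_lucky)):
--             del nums[i]
--
--         for i in nums:
--             if i > last_lucky:
--                 last_lucky = i
--                 break
--
--     return nums
--
-- def solution(number: int) -> str:
--     last = 1
--     numbers = generate_lucky_numbers()
--
--     for idx_next, lucky in enumerate(numbers, start=1):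
--         if lucky > number:
--             return f"{last} {lucky}"
--
--         elif lucky == number:
--             return f"{last} {numbers[idx_next]}"
--
--         last = lucky
-- ===== SOURCE B (Python) =====
-- def generate_lucky_numbers():
--     # 10,004 is the first lucky number over 10k
--     nums = list(range(1, 10_004, 2))
--     last_lucky = 3
--
--     for _ in range(168):
--         for i in reversed(range(last_lucky-1, len(nums), last_lucky)):
--             del nums[i]
--
--         for i in nums:
--             if i > last_lucky:
--                 last_lucky = i
--                 break
--
--     return nums
--
-- def solution(number: int) -> str:
--     numbers = generate_lucky_numbers()
--
--     # binary search: first index whose value is >= number (bisect_left)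
--     lo, hi = 0, len(numbers)
--     while lo < hi:
--         mid = (lo + hi) // 2
--         if numbers[mid] < number:
--             lo = mid + 1
--         else:
--             hi = mid
--     left = numbers[lo - 1] if lo > 0 else 1
--
--     # binary search: first index whose value is > number (bisect_right)
--     lo2, hi2 = 0, len(numbers)
--     while lo2 < hi2:
--         mid = (lo2 + hi2) // 2
--         if numbers[mid] <= number:
--             lo2 = mid + 1
--         else:
--             hi2 = mid
--     if lo2 == len(numbers):
--         return None  # no lucky number above; A falls through to None as well
--     return f"{left} {numbers[lo2]}"
-- ===== Notes on version B (the rewrite author's own statement) =====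
-- stated objective: alternative
-- what changed: The sequential enumerate-scan that maintains a running 'last' is replaced by two hand-rolled binary searches (bisect_left/bisect_right) over the sorted lucky-number list; the sieve generation is kept.
-- outside the precondition, e.g. on solution(10004): A returns None, B returns None; on solution(10003): A raises IndexError, B returns None
import Mathlib
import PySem

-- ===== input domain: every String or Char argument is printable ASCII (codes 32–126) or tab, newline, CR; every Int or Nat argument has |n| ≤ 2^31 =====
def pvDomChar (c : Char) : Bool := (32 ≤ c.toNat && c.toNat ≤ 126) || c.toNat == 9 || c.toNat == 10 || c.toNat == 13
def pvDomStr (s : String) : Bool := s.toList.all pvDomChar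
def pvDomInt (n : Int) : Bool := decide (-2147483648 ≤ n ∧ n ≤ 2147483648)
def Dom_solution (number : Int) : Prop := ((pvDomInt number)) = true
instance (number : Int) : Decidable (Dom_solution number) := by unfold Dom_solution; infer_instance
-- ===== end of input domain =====

-- B replaces A's sequential enumerate-scan with two hand-rolled binary searches over the
-- (shared) sorted lucky-number list; equivalence of the RETURN value is proved for all
-- number < 10003 (above that A raises IndexError or returns None).

-- ===== PORT A =====

-- del xs[i]  (list.pop at index; the none branch is unreachable on the in-range indices below)
def pyDel (xs : List Int) (i : Int) : List Int :=
  match PySem.List.pop? xs i with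
  | some (_, l) => l
  | none => xs

-- generate_lucky_numbers(): nums = list(range(1, 10_004, 2)); last_lucky = 3; 168 rounds of
-- descending-index deletion, then 'first element > last_lucky' becomes the new last_lucky.
-- (Source B keeps this generator verbatim, so both ports share this helper.)
def generateLuckyNumbers : List Int :=
  ((List.range 168).foldl (fun (s : List Int × Int) _ =>
      let nums := (PySem.List.pyRange (s.2 - 1) (s.1.length : Int) s.2).reverse.foldl pyDel s.1
      let last := match nums.find? (fun i => decide (i > s.2)) with
                  | some v => v
                  | none => s.2
      (nums, last))
    (PySem.List.pyRange 1 10004 2, 3)).1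

-- the 'for idx_next, lucky in enumerate(numbers, start=1)' scan of A
def scanA (numbers : List Int) (number : Int) (idxNext : Nat) (last : Int) : List Int → Option String
  | [] => none                 -- loop ends: Python falls through (returns None)
  | lucky :: rest =>
    if lucky > number then some (PySem.Int.toStr last ++ " " ++ PySem.Int.toStr lucky)
    else if lucky = number then
      (PySem.List.pyGet? numbers (idxNext : Int)).map
        (fun nxt => PySem.Int.toStr last ++ " " ++ PySem.Int.toStr nxt)
    else scanA numbers number (idxNext + 1) lucky rest

def solution (number : Int) : String :=
  let numbers := generateLuckyNumbers
  (scanA numbers number 1 1 numbers).getD ""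
  -- a none result is Python returning None / raising: outside Pre_solution

-- ===== PORT B =====

-- while lo < hi: mid = (lo+hi)//2; if numbers[mid] < number: lo = mid+1 else: hi = mid
-- (numbers[mid] is always in range here: 0 ≤ lo ≤ mid < hi ≤ len(numbers))
def blGo (numbers : List Int) (number : Int) (lo hi : Nat) : Nat :=
  if h : lo < hi then
    let mid := (lo + hi) / 2
    if numbers.getD mid 0 < number then blGo numbers number (mid + 1) hi
    else blGo numbers number lo mid
  else lo
termination_by hi - lo
decreasing_by all_goals omega

-- while lo2 < hi2: mid = (lo2+hi2)//2; if numbers[mid] <= number: lo2 = mid+1 else: hi2 = mid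
def brGo (numbers : List Int) (number : Int) (lo hi : Nat) : Nat :=
  if h : lo < hi then
    let mid := (lo + hi) / 2
    if numbers.getD mid 0 ≤ number then brGo numbers number (mid + 1) hi
    else brGo numbers number lo mid
  else lo
termination_by hi - lo
decreasing_by all_goals omega

def solution_alt (number : Int) : String :=
  let numbers := generateLuckyNumbers
  let lo := blGo numbers number 0 numbers.length
  let left := if lo > 0 then numbers.getD (lo - 1) 0 else 1
  let lo2 := brGo numbers number 0 numbers.length
  if lo2 = numbers.length then ""   -- Python: return None (no lucky number above; outside Pre_solution)
  else PySem.Int.toStr left ++ " " ++ PySem.Int.toStr (numbers.getD lo2 0)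

-- ===== PRECONDITION & SPEC =====

-- Pre_ excludes number ≥ 10003 (10003 is the largest generated lucky number): at number = 10003
-- A raises IndexError on numbers[idx_next], and for number > 10003 A falls through and returns
-- None, which is not a str.
def Pre_solution (number : Int) : Prop := number < 10003
instance (number : Int) : Decidable (Pre_solution number) := by unfold Pre_solution; infer_instance
def pvWitness_solution : Int := 7

def Spec_solution (number : Int) (out : String) : Prop := out = solution_alt number
instance (number : Int) (out : String) : Decidable (Spec_solution number out) := by unfold Spec_solution; infer_instance

-- ===== CLAIM (what is proved, stated in full; the proofs are below) =====
def Claim_equal_solution : Prop := ∀ (number : Int), Dom_solution number → Pre_solution number → Spec_solution number (solution number)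

-- ===== LEMMAS AND PROOFS =====

-- deleting an element yields a sublist
theorem pyDel_sublist (xs : List Int) (i : Int) : (pyDel xs i).Sublist xs := by
  unfold pyDel PySem.List.pop?
  cases h : PySem.List.pyIdx? xs.length i with
  | none => simp
  | some k =>
    simp only [Option.bind_some]
    cases hg : xs[k]? with
    | none => simp
    | some v => simpa using List.eraseIdx_sublist xs k

theorem foldl_pyDel_sublist (idxs : List Int) (init : List Int) :
    (idxs.foldl pyDel init).Sublist init := by
  induction idxs generalizing init with
  | nil => simp
  | cons i t ih =>
    exact (ih (pyDel init i)).trans (pyDel_sublist init i)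

theorem foldl_step_pairwise {β : Type} (step : List Int × Int → β → List Int × Int)
    (hstep : ∀ s b, List.Pairwise (· < ·) s.1 → List.Pairwise (· < ·) (step s b).1) :
    ∀ (rounds : List β) (s : List Int × Int), List.Pairwise (· < ·) s.1 →
      List.Pairwise (· < ·) ((rounds.foldl step s).1) := by
  intro rounds
  induction rounds with
  | nil => intro s hs; exact hs
  | cons r t ih => intro s hs; exact ih (step s r) (hstep s r hs)

theorem pyRange_two_pairwise (a b : Int) :
    List.Pairwise (· < ·) (PySem.List.pyRange a b 2) := by
  rw [PySem.List.pyRange_of_pos a b (by norm_num)]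
  refine List.Pairwise.map _ ?_ List.pairwise_lt_range
  intro i j hij; omega

set_option maxRecDepth 40000 in
theorem lucky_pairwise : List.Pairwise (· < ·) generateLuckyNumbers := by
  unfold generateLuckyNumbers
  apply foldl_step_pairwise
  · intro s b hs
    exact List.Pairwise.sublist (foldl_pyDel_sublist _ s.1) hs
  · show List.Pairwise _ (PySem.List.pyRange 1 10004 2)
    exact pyRange_two_pairwise 1 10004

-- monotone access into a strictly sorted list
theorem sorted_getD_lt (L : List Int) (hp : List.Pairwise (· < ·) L) {i j : Nat}
    (hij : i < j) (hj : j < L.length) : L.getD i 0 < L.getD j 0 := by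
  rw [List.getD_eq_getElem L 0 (by omega), List.getD_eq_getElem L 0 hj]
  exact List.pairwise_iff_getElem.mp hp i j (by omega) hj hij

theorem sorted_getD_le (L : List Int) (hp : List.Pairwise (· < ·) L) {i j : Nat}
    (hij : i ≤ j) (hj : j < L.length) : L.getD i 0 ≤ L.getD j 0 := by
  rcases Nat.lt_or_eq_of_le hij with h | h
  · exact le_of_lt (sorted_getD_lt L hp h hj)
  · rw [h]

-- bisect_left loop invariant
theorem blGo_spec (L : List Int) (x : Int) (hp : List.Pairwise (· < ·) L) :
    ∀ (n lo hi : Nat), hi - lo ≤ n → lo ≤ hi → hi ≤ L.length →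
      (∀ j < lo, L.getD j 0 < x) → (∀ j, hi ≤ j → j < L.length → x ≤ L.getD j 0) →
      blGo L x lo hi ≤ L.length ∧ (∀ j < blGo L x lo hi, L.getD j 0 < x) ∧
        (∀ j, blGo L x lo hi ≤ j → j < L.length → x ≤ L.getD j 0) := by
  intro n
  induction n with
  | zero =>
    intro lo hi hn hlh hhl hbelow habove
    have : lo = hi := by omega
    rw [blGo]; simp only [dif_neg (by omega : ¬ lo < hi)]
    exact ⟨by omega, hbelow, by simpa [this] using habove⟩
  | succ m ih =>
    intro lo hi hn hlh hhl hbelow habove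
    by_cases h : lo < hi
    · rw [blGo]; simp only [dif_pos h]
      by_cases hmid : L.getD ((lo + hi) / 2) 0 < x
      · simp only [if_pos hmid]
        refine ih ((lo + hi) / 2 + 1) hi (by omega) (by omega) hhl ?_ habove
        intro j hj
        exact lt_of_le_of_lt (sorted_getD_le L hp (by omega) (by omega)) hmid
      · simp only [if_neg hmid]
        refine ih lo ((lo + hi) / 2) (by omega) (by omega) (by omega) hbelow ?_
        intro j hj hjl
        exact le_trans (le_of_not_gt hmid) (sorted_getD_le L hp (by omega) hjl)
    · rw [blGo]; simp only [dif_neg h]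
      have : lo = hi := by omega
      exact ⟨by omega, hbelow, by simpa [this] using habove⟩

-- bisect_right loop invariant
theorem brGo_spec (L : List Int) (x : Int) (hp : List.Pairwise (· < ·) L) :
    ∀ (n lo hi : Nat), hi - lo ≤ n → lo ≤ hi → hi ≤ L.length →
      (∀ j < lo, L.getD j 0 ≤ x) → (∀ j, hi ≤ j → j < L.length → x < L.getD j 0) →
      brGo L x lo hi ≤ L.length ∧ (∀ j < brGo L x lo hi, L.getD j 0 ≤ x) ∧
        (∀ j, brGo L x lo hi ≤ j → j < L.length → x < L.getD j 0) := by
  intro n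
  induction n with
  | zero =>
    intro lo hi hn hlh hhl hbelow habove
    have : lo = hi := by omega
    rw [brGo]; simp only [dif_neg (by omega : ¬ lo < hi)]
    exact ⟨by omega, hbelow, by simpa [this] using habove⟩
  | succ m ih =>
    intro lo hi hn hlh hhl hbelow habove
    by_cases h : lo < hi
    · rw [brGo]; simp only [dif_pos h]
      by_cases hmid : L.getD ((lo + hi) / 2) 0 ≤ x
      · simp only [if_pos hmid]
        refine ih ((lo + hi) / 2 + 1) hi (by omega) (by omega) hhl ?_ habove
        intro j hj
        exact le_trans (sorted_getD_le L hp (by omega) (by omega)) hmid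
      · simp only [if_neg hmid]
        refine ih lo ((lo + hi) / 2) (by omega) (by omega) (by omega) hbelow ?_
        intro j hj hjl
        exact lt_of_lt_of_le (lt_of_not_ge hmid) (sorted_getD_le L hp (by omega) hjl)
    · rw [brGo]; simp only [dif_neg h]
      have : lo = hi := by omega
      exact ⟨by omega, hbelow, by simpa [this] using habove⟩

-- the sequential scan computes exactly what the two binary searches compute
theorem scan_eq (L : List Int) (x : Int) (hp : List.Pairwise (· < ·) L) :
    ∀ (n k : Nat) (last : Int), L.length - k ≤ n → k ≤ L.length →
      (∀ j < k, L.getD j 0 < x) → last = (if k = 0 then 1 else L.getD (k - 1) 0) →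
      scanA L x (k + 1) last (L.drop k) =
        (if brGo L x 0 L.length = L.length then none
         else some (PySem.Int.toStr
             (if blGo L x 0 L.length > 0 then L.getD (blGo L x 0 L.length - 1) 0 else 1)
           ++ " " ++ PySem.Int.toStr (L.getD (brGo L x 0 L.length) 0))) := by
  obtain ⟨hp1, hp2, hp3⟩ := blGo_spec L x hp L.length 0 L.length (by omega) (by omega)
    (le_refl _) (by omega) (by omega)
  obtain ⟨hq1, hq2, hq3⟩ := brGo_spec L x hp L.length 0 L.length (by omega) (by omega)
    (le_refl _) (by omega) (by omega)
  set p := blGo L x 0 L.length with hpdef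
  set q := brGo L x 0 L.length with hqdef
  intro n
  induction n with
  | zero =>
    intro k last hn hk hbelow hlast
    have hkl : k = L.length := by omega
    have hq : q = L.length := by
      by_contra hne
      have hql : q < L.length := by omega
      exact absurd (hq3 q (le_refl q) hql) (not_lt.mpr (le_of_lt (hbelow q (by omega))))
    rw [hkl, List.drop_length]
    simp [scanA, hq]
  | succ m ih =>
    intro k last hn hk hbelow hlast
    by_cases hkl : k < L.length
    · rw [List.drop_eq_getElem_cons hkl]
      have hc : L[k] = L.getD k 0 := (List.getD_eq_getElem L 0 hkl).symm
      rw [hc]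
      by_cases hgt : L.getD k 0 > x
      · -- first element ≥ x, strictly greater: p = q = k
        have hpk : p = k := by
          rcases Nat.lt_trichotomy p k with h | h | h
          · exact absurd (hp3 p (le_refl p) (by omega)) (not_le.mpr (hbelow p h))
          · exact h
          · exact absurd (hp2 k h) (not_lt.mpr (le_of_lt hgt))
        have hqk : q = k := by
          rcases Nat.lt_trichotomy q k with h | h | h
          · exact absurd (hq3 q (le_refl q) (by omega)) (not_lt.mpr (le_of_lt (hbelow q h)))
          · exact h
          · exact absurd (hq2 k h) (not_le.mpr hgt)
        simp only [scanA, if_pos hgt]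
        rw [if_neg (by omega : ¬ q = L.length), hpk, hqk, hlast]
        rcases Nat.eq_zero_or_pos k with h0 | h0
        · simp [h0]
        · simp [if_neg (by omega : ¬ k = 0), if_pos (by omega : k > 0)]
      · by_cases heq : L.getD k 0 = x
        · -- element found: p = k, q = k + 1
          have hpk : p = k := by
            rcases Nat.lt_trichotomy p k with h | h | h
            · exact absurd (hp3 p (le_refl p) (by omega)) (not_le.mpr (hbelow p h))
            · exact h
            · exact absurd (hp2 k h) (by rw [heq]; exact lt_irrefl x)
          have hqk : q = k + 1 := by
            rcases Nat.lt_trichotomy q (k + 1) with h | h | h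
            · have hqle : q ≤ k := by omega
              have := hq3 k (by omega) hkl
              rw [heq] at this; exact absurd this (lt_irrefl x)
            · exact h
            · have hk1 : k + 1 < L.length := by omega
              have := hq2 (k + 1) h
              have hlt : L.getD k 0 < L.getD (k + 1) 0 := sorted_getD_lt L hp (by omega) hk1
              rw [heq] at hlt; omega
          simp only [scanA, if_neg (by omega : ¬ L.getD k 0 > x), if_pos heq]
          rw [PySem.List.pyGet?_natCast]
          by_cases hend : k + 1 = L.length
          · rw [List.getElem?_eq_none (by omega), if_pos (by omega : q = L.length)]
            simp
          · have hk1 : k + 1 < L.length := by omega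
            rw [List.getElem?_eq_getElem hk1, if_neg (by omega : ¬ q = L.length)]
            simp only [Option.map_some]
            rw [hlast, hpk, hqk]
            have : L[k+1] = L.getD (k+1) 0 := (List.getD_eq_getElem L 0 hk1).symm
            rw [this]
            rcases Nat.eq_zero_or_pos k with h0 | h0
            · simp [h0]
            · simp [if_neg (by omega : ¬ k = 0), if_pos (by omega : k > 0)]
        · -- element still below x: keep scanning
          have hlt : L.getD k 0 < x := by omega
          simp only [scanA, if_neg (by omega : ¬ L.getD k 0 > x), if_neg heq]
          refine ih (k + 1) (L.getD k 0) (by omega) (by omega) ?_ ?_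
          · intro j hj
            rcases Nat.lt_trichotomy j k with h | h | h
            · exact hbelow j h
            · rw [h]; exact hlt
            · omega
          · simp
    · have : k = L.length := by omega
      have hq : q = L.length := by
        by_contra hne
        have hql : q < L.length := by omega
        exact absurd (hq3 q (le_refl q) hql) (not_lt.mpr (le_of_lt (hbelow q (by omega))))
      rw [this, List.drop_length]
      simp [scanA, hq]

-- ===== VERDICT (by name: the statement is the Claim_ definition above) =====
theorem solution_spec : Claim_equal_solution := by
  unfold Claim_equal_solution
  intro number _hdom _hpre
  unfold Spec_solution solution solution_alt
  have hp := lucky_pairwise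
  have h : scanA generateLuckyNumbers number 1 1 generateLuckyNumbers =
      (if brGo generateLuckyNumbers number 0 generateLuckyNumbers.length
          = generateLuckyNumbers.length then none
       else some (PySem.Int.toStr
           (if blGo generateLuckyNumbers number 0 generateLuckyNumbers.length > 0 then
              generateLuckyNumbers.getD
                (blGo generateLuckyNumbers number 0 generateLuckyNumbers.length - 1) 0
            else 1)
         ++ " " ++ PySem.Int.toStr (generateLuckyNumbers.getD
              (brGo generateLuckyNumbers number 0 generateLuckyNumbers.length) 0))) := by
    have h0 := scan_eq generateLuckyNumbers number hp generateLuckyNumbers.length 0 1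
      (by omega) (by omega) (by omega) (by simp)
    rw [List.drop_zero] at h0
    simpa using h0
  show (scanA generateLuckyNumbers number 1 1 generateLuckyNumbers).getD "" =
      (if brGo generateLuckyNumbers number 0 generateLuckyNumbers.length
          = generateLuckyNumbers.length then ""
       else PySem.Int.toStr
           (if blGo generateLuckyNumbers number 0 generateLuckyNumbers.length > 0 then
              generateLuckyNumbers.getD
                (blGo generateLuckyNumbers number 0 generateLuckyNumbers.length - 1) 0
            else 1)
         ++ " " ++ PySem.Int.toStr (generateLuckyNumbers.getD
              (brGo generateLuckyNumbers number 0 generateLuckyNumbers.length) 0))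
  rw [h]
  by_cases hq : brGo generateLuckyNumbers number 0 generateLuckyNumbers.length
      = generateLuckyNumbers.length
  · rw [if_pos hq, if_pos hq]
    rfl
  · rw [if_neg hq, if_neg hq]
    rfl
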